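-- pv_equiv track=rewrite | github.com/code-study-classes/python-basics-elektrosila | practice_package/strings.py | count_vowel_groups
-- ===== SOURCE A (Python) =====
-- def count_vowel_groups(word: str) -> int:
--     vowels = "aeiouyAEIOUY"
--     count = 0
--     in_group = False
--
--     for char in word:
--         if char in vowels:
--             if not in_group:
--                 count += 1
--                 in_group = True
--         else:
--             in_group = False
--     return count
-- ===== SOURCE B (Python) =====
-- import re
--
-- _VOWEL_RUN = re.compile(r'[aeiouyAEIOUY]+')
--
-- def count_vowel_groups(word: str) -> int:
--     return len(_VOWEL_RUN.findall(word))
-- ===== Notes on version B (the rewrite author's own statement) =====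
-- stated objective: idiomatic
-- what changed: Replaces the character-by-character boolean state machine with a regex that matches each maximal vowel run and counts the matches.
import Mathlib
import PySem

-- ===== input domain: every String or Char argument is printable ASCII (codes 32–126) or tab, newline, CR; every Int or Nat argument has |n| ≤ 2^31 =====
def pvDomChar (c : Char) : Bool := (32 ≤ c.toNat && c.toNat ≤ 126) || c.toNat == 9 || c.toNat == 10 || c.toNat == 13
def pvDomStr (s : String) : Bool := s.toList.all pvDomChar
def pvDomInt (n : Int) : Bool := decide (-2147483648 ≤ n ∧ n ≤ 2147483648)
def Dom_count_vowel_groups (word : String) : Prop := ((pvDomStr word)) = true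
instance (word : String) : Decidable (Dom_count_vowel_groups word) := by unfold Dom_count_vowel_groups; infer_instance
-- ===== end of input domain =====

-- B replaces A's boolean state machine with counting the maximal vowel runs (regex match count); objective: idiomatic.


-- ===== PORT A =====
-- 'char in vowels' for the literal vowels string
def pvIsVowel (c : Char) : Bool := "aeiouyAEIOUY".toList.contains c

-- literal port of A: fold over the characters with state (count, in_group)
def count_vowel_groups (word : String) : Int :=
  (word.toList.foldl
    (fun (st : Int × Bool) ch =>
      if pvIsVowel ch then
        if !st.2 then (st.1 + 1, true) else (st.1, true)
      else
        (st.1, false))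
    (0, false)).1

-- ===== PORT B =====
-- port of len(re.findall(r'[aeiouyAEIOUY]+', word)): the number of non-overlapping
-- maximal vowel runs = the number of positions that START a run (a vowel whose
-- predecessor is absent or not a vowel); exact for this fixed character-class pattern.
def count_vowel_groups_alt (word : String) : Int :=
  let vs := word.toList.map pvIsVowel
  (((false :: vs).zip vs).filter (fun p => !p.1 && p.2)).length

-- ===== PRECONDITION & SPEC =====
def Spec_count_vowel_groups (word : String) (out : Int) : Prop := out = count_vowel_groups_alt word
instance (word : String) (out : Int) : Decidable (Spec_count_vowel_groups word out) := by unfold Spec_count_vowel_groups; infer_instance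

-- ===== CLAIM (what is proved, stated in full; the proofs are below) =====
def Claim_equal_count_vowel_groups : Prop := ∀ (word : String), Dom_count_vowel_groups word → Spec_count_vowel_groups word (count_vowel_groups word)

-- ===== LEMMAS AND PROOFS =====

-- loop invariant: A's fold from (c, g) adds exactly the number of run starts,
-- where the bit g plays the role of "previous character was a vowel".
theorem pv_fold_counts_starts (l : List Char) (c : Int) (g : Bool) :
    (l.foldl
      (fun (st : Int × Bool) ch =>
        if pvIsVowel ch then
          if !st.2 then (st.1 + 1, true) else (st.1, true)
        else
          (st.1, false))
      (c, g)).1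
    = c + ((((g :: l.map pvIsVowel)).zip (l.map pvIsVowel)).filter (fun p => !p.1 && p.2)).length := by
  induction l generalizing c g with
  | nil => simp
  | cons ch t ih =>
    simp only [List.foldl_cons, List.map_cons, List.zip_cons_cons, List.filter_cons]
    cases hv : pvIsVowel ch <;> cases g <;>
      simp only [hv, Bool.not_true, Bool.not_false, Bool.true_and, Bool.false_and,
        Bool.and_true, Bool.and_false, if_true, if_false, List.length_cons] <;>
      rw [ih] <;> push_cast <;> ring

-- ===== VERDICT (by name: the statement is the Claim_ definition above) =====
theorem count_vowel_groups_spec : Claim_equal_count_vowel_groups := by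
  intro word _
  unfold Spec_count_vowel_groups count_vowel_groups count_vowel_groups_alt
  rw [pv_fold_counts_starts]
  simp
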